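-- pv_equiv track=rewrite | github.com/dylanxlam/CS313E_notes | exam2/Prices.py | compute_weeks
-- ===== SOURCE A (Python) =====
-- def compute_weeks(prices):
--     stack = []
--     weeks = [-1] * len(prices)
--
--     for i in range(len(prices) - 1, -1, -1):
--         while stack and prices[i] >= prices[stack[-1]]:
--             stack.pop()
--
--         if stack:
--             weeks[i] = stack[-1] - i
--
--         stack.append(i)
--
--     return weeks
-- ===== SOURCE B (Python) =====
-- def compute_weeks(prices):
--     n = len(prices)
--     weeks = []
--     for i in range(n):
--         d = -1
--         for j in range(i + 1, n):
--             if prices[j] > prices[i]: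
--                 d = j - i
--                 break
--         weeks.append(d)
--     return weeks
-- ===== Notes on version B (the rewrite author's own statement) =====
-- stated objective: simpler
-- what changed: Replaces the right-to-left monotonic stack with a direct forward scan: for each index, walk right and record the distance to the first strictly greater price.
import Mathlib
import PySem

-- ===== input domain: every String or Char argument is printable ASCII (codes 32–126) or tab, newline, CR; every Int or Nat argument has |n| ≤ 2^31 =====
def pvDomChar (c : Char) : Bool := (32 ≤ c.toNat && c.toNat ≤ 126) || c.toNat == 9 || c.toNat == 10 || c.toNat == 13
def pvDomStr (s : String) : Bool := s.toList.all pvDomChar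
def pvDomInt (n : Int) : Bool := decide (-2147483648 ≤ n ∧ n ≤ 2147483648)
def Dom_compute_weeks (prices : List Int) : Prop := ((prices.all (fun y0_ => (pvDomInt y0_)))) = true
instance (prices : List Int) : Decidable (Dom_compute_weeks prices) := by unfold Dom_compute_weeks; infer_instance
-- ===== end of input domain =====

-- B replaces A's right-to-left monotonic stack with a plain forward scan for the first
-- strictly greater price to the right (simpler, not faster).

-- ===== PORT A =====
-- Python's `stack` (append / stack[-1] / pop at the right end) is represented with the
-- top at the HEAD of the Lean list: append → cons, stack[-1] → head, pop → tail.
-- `while stack and prices[i] >= prices[stack[-1]]: stack.pop()`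
def pvPopWhile (prices : List Int) (i : Int) : List Int → List Int
  | [] => []
  | j :: rest =>
    if PySem.List.pyGetD prices j 0 ≤ PySem.List.pyGetD prices i 0 then
      pvPopWhile prices i rest
    else j :: rest

-- one iteration of A's `for i in range(len(prices)-1, -1, -1)` body; state = (stack, weeks).
-- `weeks[i] = stack[-1] - i` : i is a loop index with 0 ≤ i < len, so `.set i.toNat` is exact.
def pvStepA (prices : List Int) (st : List Int × List Int) (i : Int) : List Int × List Int :=
  let stack := pvPopWhile prices i st.1
  let weeks :=
    match stack with
    | [] => st.2
    | j :: _ => st.2.set i.toNat (j - i)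
  (i :: stack, weeks)

def compute_weeks (prices : List Int) : List Int :=
  ((PySem.List.pyRange ((prices.length : Int) - 1) (-1) (-1)).foldl (pvStepA prices)
    ([], List.replicate prices.length (-1))).2

-- ===== PORT B =====
-- inner loop `for j in range(i+1, n): if prices[j] > prices[i]: d = j - i; break` (else d = -1)
def pvScanB (prices : List Int) (i : Nat) : List Nat → Int
  | [] => -1
  | j :: rest =>
    if prices.getD i 0 < prices.getD j 0 then (j : Int) - (i : Int)
    else pvScanB prices i rest

def compute_weeks_alt (prices : List Int) : List Int :=
  (List.range prices.length).map
    (fun i => pvScanB prices i (List.range' (i + 1) (prices.length - (i + 1))))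

-- ===== PRECONDITION & SPEC =====
def Spec_compute_weeks (prices : List Int) (out : List Int) : Prop := out = compute_weeks_alt prices
instance (prices : List Int) (out : List Int) : Decidable (Spec_compute_weeks prices out) := by unfold Spec_compute_weeks; infer_instance

-- ===== CLAIM (what is proved, stated in full; the proofs are below) =====
def Claim_equal_compute_weeks : Prop := ∀ (prices : List Int), Dom_compute_weeks prices → Spec_compute_weeks prices (compute_weeks prices)

-- ===== LEMMAS AND PROOFS =====

-- `prices[i] < prices[j]` as a Bool (indices known in range)
def pvGt (P : List Int) (i j : Nat) : Bool := decide (P.getD i 0 < P.getD j 0)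

-- j survives on A's stack once the loop has processed down to index i:
-- every index strictly between i (incl.) and j carries a strictly smaller price
def pvQual (P : List Int) (i j : Nat) : Bool :=
  (List.range' i (j - i)).all (fun k => decide (P.getD k 0 < P.getD j 0))

-- A's stack (top first) after the loop has processed indices down to i
def pvStk (P : List Int) (i : Nat) : List Nat :=
  (List.range' i (P.length - i)).filter (pvQual P i)

-- A's weeks array after the loop has processed indices down to i
def pvWeeksAt (P : List Int) (i : Nat) : List Int :=
  (List.range P.length).map
    (fun m => if m < i then -1 else pvScanB P m (List.range' (m + 1) (P.length - (m + 1))))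

theorem pvScanB_eq_head (P : List Int) (i : Nat) (l : List Nat) :
    pvScanB P i l = (match l.filter (pvGt P i) with
      | [] => -1
      | j :: _ => (j : Int) - (i : Int)) := by
  induction l with
  | nil => rfl
  | cons j rest ih =>
    by_cases h : P.getD i 0 < P.getD j 0
    · rw [pvScanB, if_pos h, List.filter_cons_of_pos (p := pvGt P i) (decide_eq_true h)]
    · rw [pvScanB, if_neg h, List.filter_cons_of_neg (p := pvGt P i) (by simpa [pvGt] using h), ih]

theorem pvPopWhile_map (P : List Int) (i : Nat) (L : List Nat)
    (hp : L.Pairwise (fun a b => P.getD a 0 < P.getD b 0)) :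
    pvPopWhile P (i : Int) (L.map (fun j : Nat => (j : Int))) =
      (L.filter (pvGt P i)).map (fun j : Nat => (j : Int)) := by
  induction L with
  | nil => rfl
  | cons j rest ih =>
    rcases List.pairwise_cons.mp hp with ⟨hj, hrest⟩
    by_cases h : P.getD i 0 < P.getD j 0
    · have hrestf : rest.filter (pvGt P i) = rest := by
        refine List.filter_eq_self.mpr (fun a ha => ?_)
        exact decide_eq_true (lt_trans h (hj a ha))
      rw [List.map_cons, pvPopWhile, PySem.List.pyGetD_natCast, PySem.List.pyGetD_natCast,
        if_neg (show ¬ P.getD j 0 ≤ P.getD i 0 from not_le.mpr h), List.filter_cons_of_pos (p := pvGt P i) (by simpa [pvGt] using h), hrestf, List.map_cons]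
    · rw [List.map_cons, pvPopWhile, PySem.List.pyGetD_natCast, PySem.List.pyGetD_natCast,
        if_pos (show P.getD j 0 ≤ P.getD i 0 from not_lt.mp h), ih hrest, List.filter_cons_of_neg (p := pvGt P i) (by simpa [pvGt] using h)]

theorem pvStk_pairwise (P : List Int) (i : Nat) :
    (pvStk P i).Pairwise (fun a b => P.getD a 0 < P.getD b 0) := by
  unfold pvStk
  rw [List.pairwise_filter]
  refine (List.pairwise_lt_range' 1).imp_of_mem ?_
  intro a b ha hb hab _ hq
  have hb' := List.mem_range'_1.mp hb
  have ha' := List.mem_range'_1.mp ha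
  have hmem : a ∈ List.range' i (b - i) := List.mem_range'_1.mpr ⟨ha'.1, by omega⟩
  exact of_decide_eq_true (List.all_eq_true.mp hq a hmem)

theorem pvQual_self (P : List Int) (i : Nat) : pvQual P i i = true := by
  simp [pvQual]

theorem pvQual_split (P : List Int) (i j : Nat) (h : i < j) :
    pvQual P i j = (pvGt P i j && pvQual P (i + 1) j) := by
  unfold pvQual pvGt
  have hji : j - i = (j - (i + 1)) + 1 := by omega
  rw [hji, List.range'_succ, List.all_cons]

theorem pvStk_cons (P : List Int) (i : Nat) (h : i < P.length) :
    pvStk P i = i :: (pvStk P (i + 1)).filter (pvGt P i) := by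
  unfold pvStk
  have hn : P.length - i = (P.length - (i + 1)) + 1 := by omega
  rw [hn, List.range'_succ, List.filter_cons_of_pos (p := pvQual P i) (pvQual_self P i), List.filter_filter]
  congr 1
  refine List.filter_congr (fun j hj => ?_)
  have hj' := List.mem_range'_1.mp hj
  exact pvQual_split P i j (by omega)

theorem pvHeads_eq (P : List Int) (i : Nat) :
    ∀ (m t : Nat), i + 1 ≤ t → (∀ k, i + 1 ≤ k → k < t → pvGt P i k = false) →
    ((List.range' t m).filter (fun j => pvGt P i j && pvQual P (i + 1) j)).head? =
      ((List.range' t m).filter (pvGt P i)).head? := by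
  intro m
  induction m with
  | zero => intro t _ _; rfl
  | succ m ih =>
    intro t ht hall
    rw [List.range'_succ]
    by_cases h : pvGt P i t = true
    · have hq : pvQual P (i + 1) t = true := by
        unfold pvQual
        refine List.all_eq_true.mpr (fun k hk => ?_)
        have hk' := List.mem_range'_1.mp hk
        have h1 : pvGt P i k = false := hall k hk'.1 (by omega)
        have h2 : ¬ P.getD i 0 < P.getD k 0 := by simpa [pvGt] using h1
        have h3 : P.getD i 0 < P.getD t 0 := of_decide_eq_true h
        exact decide_eq_true (lt_of_le_of_lt (not_lt.mp h2) h3)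
      rw [List.filter_cons_of_pos (p := fun j => pvGt P i j && pvQual P (i + 1) j) (by simp [h, hq]),
        List.filter_cons_of_pos (p := pvGt P i) h]
      simp
    · have h' : pvGt P i t = false := by simpa using h
      rw [List.filter_cons_of_neg (p := fun j => pvGt P i j && pvQual P (i + 1) j) (by simp [h']),
        List.filter_cons_of_neg (p := pvGt P i) (by simp [h'])]
      exact ih (t + 1) (by omega) (fun k hk1 hk2 => by
        by_cases hkt : k = t
        · subst hkt; exact h'
        · exact hall k hk1 (by omega))

theorem pvStepA_inv (P : List Int) (i : Nat) (h : i < P.length) :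
    pvStepA P ((pvStk P (i + 1)).map (fun j : Nat => (j : Int)), pvWeeksAt P (i + 1)) (i : Int) =
      ((pvStk P i).map (fun j : Nat => (j : Int)), pvWeeksAt P i) := by
  have hpop := pvPopWhile_map P i (pvStk P (i + 1)) (pvStk_pairwise P (i + 1))
  have hFF : (pvStk P (i + 1)).filter (pvGt P i) =
      (List.range' (i + 1) (P.length - (i + 1))).filter
        (fun j => pvGt P i j && pvQual P (i + 1) j) := by
    unfold pvStk; rw [List.filter_filter]
  have hheads : ((pvStk P (i + 1)).filter (pvGt P i)).head? =
      ((List.range' (i + 1) (P.length - (i + 1))).filter (pvGt P i)).head? := by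
    rw [hFF]
    exact pvHeads_eq P i _ (i + 1) le_rfl (fun k hk1 hk2 => by omega)
  rcases hFc : (pvStk P (i + 1)).filter (pvGt P i) with _ | ⟨j, rest⟩
  · rw [hFc] at hpop hheads
    have hG : (List.range' (i + 1) (P.length - (i + 1))).filter (pvGt P i) = [] :=
      List.head?_eq_none_iff.mp hheads.symm
    have hscan : pvScanB P i (List.range' (i + 1) (P.length - (i + 1))) = -1 := by
      rw [pvScanB_eq_head, hG]
    unfold pvStepA
    simp only [hpop, List.map_nil, Prod.mk.injEq]
    refine ⟨?_, ?_⟩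
    · rw [pvStk_cons P i h, hFc]; rfl
    · apply List.ext_getElem (by simp [pvWeeksAt])
      intro m hm1 hm2
      simp only [pvWeeksAt, List.getElem_map, List.getElem_range]
      by_cases hmi : m = i
      · subst hmi; rw [if_pos (by omega), if_neg (by omega), hscan]
      · by_cases hlt : m < i
        · rw [if_pos (by omega), if_pos hlt]
        · rw [if_neg (by omega), if_neg hlt]
  · rw [hFc] at hpop hheads
    obtain ⟨r', hG⟩ := List.head?_eq_some_iff.mp hheads.symm
    have hscan : pvScanB P i (List.range' (i + 1) (P.length - (i + 1))) = (j : Int) - (i : Int) := by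
      rw [pvScanB_eq_head, hG]
    unfold pvStepA
    simp only [hpop, List.map_cons, Prod.mk.injEq]
    refine ⟨?_, ?_⟩
    · rw [pvStk_cons P i h, hFc]; rfl
    · apply List.ext_getElem (by simp [pvWeeksAt])
      intro m hm1 hm2
      simp only [Int.toNat_natCast]
      rw [List.getElem_set]
      simp only [pvWeeksAt, List.getElem_map, List.getElem_range]
      by_cases hmi : i = m
      · rw [if_pos hmi]; subst hmi; rw [if_neg (by omega), hscan]
      · rw [if_neg hmi]
        by_cases hlt : m < i
        · rw [if_pos (by omega), if_pos hlt]
        · rw [if_neg (by omega), if_neg hlt]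

theorem pvFold_inv (P : List Int) :
    ∀ (m i : Nat), i + m ≤ P.length →
    ((List.range' i m).reverse.map (fun j : Nat => (j : Int))).foldl (pvStepA P)
        ((pvStk P (i + m)).map (fun j : Nat => (j : Int)), pvWeeksAt P (i + m)) =
      ((pvStk P i).map (fun j : Nat => (j : Int)), pvWeeksAt P i) := by
  intro m
  induction m with
  | zero => intro i _; rfl
  | succ m ih =>
    intro i hle
    rw [List.range'_succ, List.reverse_cons, List.map_append, List.foldl_append]
    have harith : i + 1 + m = i + (m + 1) := by omega
    have hih := ih (i + 1) (by omega)
    rw [harith] at hih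
    rw [hih]
    simpa using pvStepA_inv P i (by omega)

theorem pvRange_desc (n : Nat) :
    PySem.List.pyRange ((n : Int) - 1) (-1) (-1) =
      (List.range' 0 n).reverse.map (fun j : Nat => (j : Int)) := by
  rcases Nat.eq_zero_or_pos n with h0 | hpos
  · subst h0; decide
  · unfold PySem.List.pyRange
    have hc : ((-1 : Int) < (n : Int) - 1) := by
      have h1 : (1 : Int) ≤ (n : Int) := by exact_mod_cast hpos
      omega
    rw [if_neg (by norm_num), if_neg (by norm_num), if_pos hc]
    have hcount : (((n : Int) - 1 - -1 + - -1 - 1) / - -1).toNat = n := by norm_num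
    rw [hcount, List.reverse_range', List.map_map]
    refine List.map_congr_left (fun k hk => ?_)
    have hk' := List.mem_range.mp hk
    simp only [Function.comp]
    omega

theorem pvInit_weeks (P : List Int) :
    pvWeeksAt P P.length = List.replicate P.length (-1) := by
  apply List.ext_getElem (by simp [pvWeeksAt])
  intro m hm1 hm2
  have hm : m < P.length := by simpa [pvWeeksAt] using hm1
  simp [pvWeeksAt, hm]

theorem pvInit_stk (P : List Int) : pvStk P P.length = [] := by
  simp [pvStk]

theorem pvFinal_weeks (P : List Int) : pvWeeksAt P 0 = compute_weeks_alt P := by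
  unfold pvWeeksAt compute_weeks_alt
  refine List.map_congr_left (fun m _ => ?_)
  simp

-- ===== VERDICT (by name: the statement is the Claim_ definition above) =====
theorem compute_weeks_spec : Claim_equal_compute_weeks := by
  intro P _
  unfold Spec_compute_weeks compute_weeks
  rw [pvRange_desc P.length, ← pvInit_weeks P]
  have hstk : ([] : List Int) = (pvStk P P.length).map (fun j : Nat => (j : Int)) := by
    rw [pvInit_stk]; rfl
  rw [hstk]
  have hfold := pvFold_inv P P.length 0 (by omega)
  rw [Nat.zero_add] at hfold
  rw [hfold, pvFinal_weeks]
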